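-- pv_equiv track=rewrite | github.com/phil-huynh/Problem-Sets | python/CodeWars/6kyu/make_everyone_happy.py | smile
-- ===== SOURCE A (Python) =====
-- def smile(text):
--     text = [x for x in text]
--     eyes = [":", ";", "="]
--     noses = ["-", "~"]
--     smiles = { "[": "]", "(": ")"}
--     result = ""
--     for i in range(len(text)):
--         if text[i] in eyes:
--             try:
--                 if text[i + 1] in smiles:
--                     text[i + 1] = smiles[text[i + 1]]
--                 if text[i + 1] in noses and text[i + 2] in smiles:
--                     text[i + 2] = smiles[text[i + 2]]
--                 result += text[i]
--             except IndexError: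
--                 result += text[i]
--         else:
--             result += text[i]
--     return result
-- ===== SOURCE B (Python) =====
-- def smile(text):
--     eyes = {":", ";", "="}
--     noses = {"-", "~"}
--     flip = {"[": "]", "(": ")"}
--     def out(j):
--         c = text[j]
--         if c in flip and (
--             (j >= 1 and text[j - 1] in eyes)
--             or (j >= 2 and text[j - 1] in noses and text[j - 2] in eyes)
--         ):
--             return flip[c]
--         return c
--     return "".join(out(j) for j in range(len(text)))
-- ===== Notes on version B (the rewrite author's own statement) =====
-- stated objective: alternative
-- what changed: B replaces A's forward look-ahead that mutates a shared character list (with try/except for the end of string) by a read-only backward look-behind: each output character is computed independently from the two preceding original characters, with explicit index bounds instead of exception handling.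
import Mathlib
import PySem

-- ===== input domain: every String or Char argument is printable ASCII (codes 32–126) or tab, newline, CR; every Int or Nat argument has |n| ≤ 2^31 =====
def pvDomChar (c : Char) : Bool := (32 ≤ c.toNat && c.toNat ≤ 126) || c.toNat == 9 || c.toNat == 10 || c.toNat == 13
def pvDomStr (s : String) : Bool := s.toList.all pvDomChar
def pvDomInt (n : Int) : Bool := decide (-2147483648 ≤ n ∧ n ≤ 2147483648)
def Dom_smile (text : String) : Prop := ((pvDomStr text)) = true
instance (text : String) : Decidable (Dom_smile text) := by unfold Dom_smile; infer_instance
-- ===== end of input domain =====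

-- B replaces A's forward look-ahead that mutates a shared character list (try/except at
-- the string end) by a read-only look-behind pass computing each output character
-- independently from the original text (alternative decomposition, same cost).

-- ===== PORT A =====
def pyEyes : List Char := [':', ';', '=']
def pyNoses : List Char := ['-', '~']
def pySmiles : List (Char × Char) := [('[', ']'), ('(', ')')]

-- one iteration of A's for-loop (state: mutable char list, result chars);
-- the `none` cases of `[·]?` are Python's caught IndexError
def smileStep (st : List Char × List Char) (i : Nat) : List Char × List Char :=
  let t := st.1
  let result := st.2
  let ti := t.getD i ' '
  if ti ∈ pyEyes then
    match t[i+1]? with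
    | none => (t, result ++ [ti])
    | some c1 =>
      let t1 := match pySmiles.lookup c1 with
                | some d => t.set (i+1) d
                | none => t
      let c1' := t1.getD (i+1) ' '
      if c1' ∈ pyNoses then
        match t1[i+2]? with
        | none => (t1, result ++ [ti])
        | some c2 =>
          match pySmiles.lookup c2 with
          | some d => (t1.set (i+2) d, result ++ [ti])
          | none => (t1, result ++ [ti])
      else (t1, result ++ [ti])
  else (t, result ++ [ti])

def smile (text : String) : String :=
  let t := text.toList
  String.ofList ((List.range t.length).foldl smileStep (t, [])).2

-- ===== PORT B =====
def altEyes : List Char := [':', ';', '=']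
def altNoses : List Char := ['-', '~']
def altFlip : List (Char × Char) := [('[', ']'), ('(', ')')]

-- B's helper out(j): the output character at index j, from the original text only
def altChar (l : List Char) (j : Nat) : Char :=
  let c := l.getD j ' '
  match altFlip.lookup c with
  | some d =>
    if (1 ≤ j ∧ l.getD (j-1) ' ' ∈ altEyes) ∨
       (2 ≤ j ∧ l.getD (j-1) ' ' ∈ altNoses ∧ l.getD (j-2) ' ' ∈ altEyes)
    then d else c
  | none => c

def smile_alt (text : String) : String :=
  let l := text.toList
  String.ofList ((List.range l.length).map (altChar l))

-- ===== PRECONDITION & SPEC =====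
def Spec_smile (text : String) (out : String) : Prop := out = smile_alt text
instance (text : String) (out : String) : Decidable (Spec_smile text out) := by unfold Spec_smile; infer_instance

-- ===== CLAIM (what is proved, stated in full; the proofs are below) =====
def Claim_equal_smile : Prop := ∀ (text : String), Dom_smile text → Spec_smile text (smile text)

-- ===== LEMMAS AND PROOFS =====

-- original character at index j (default ' ' for out-of-range, unreachable in use)
def gch (l : List Char) (j : Nat) : Char := l.getD j ' '

-- "the nose rule has fired at position j"
abbrev nCond (l : List Char) (j : Nat) : Prop :=
  (altFlip.lookup (gch l j)).isSome = true ∧ 2 ≤ j ∧ gch l (j-1) ∈ altNoses ∧ gch l (j-2) ∈ altEyes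

-- value of A's mutable list at index j after k loop iterations
def mval (l : List Char) (k j : Nat) : Char :=
  if j ≤ k then altChar l j
  else if j = k+1 ∧ nCond l j then (altFlip.lookup (gch l j)).getD ' '
  else gch l j

def mutL (l : List Char) (k : Nat) : List Char :=
  (List.range l.length).map (mval l k)

theorem mutL_length (l : List Char) (k : Nat) : (mutL l k).length = l.length := by
  simp [mutL]

theorem mutL_getElem? (l : List Char) (k j : Nat) :
    (mutL l k)[j]? = if j < l.length then some (mval l k j) else none := by
  simp [mutL, List.getElem?_map]
  split <;> simp_all

theorem mutL_getD (l : List Char) (k j : Nat) (hj : j < l.length) :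
    (mutL l k).getD j ' ' = mval l k j := by
  simp [List.getD, mutL_getElem?, hj]

theorem lookup_flip {c d : Char} (h : altFlip.lookup c = some d) :
    (c = '[' ∧ d = ']') ∨ (c = '(' ∧ d = ')') := by
  by_cases h1 : c = '['
  · subst h1
    rw [show altFlip.lookup '[' = some ']' from by decide] at h
    exact Or.inl ⟨rfl, (Option.some_inj.mp h).symm⟩
  · by_cases h2 : c = '('
    · subst h2
      rw [show altFlip.lookup '(' = some ')' from by decide] at h
      exact Or.inr ⟨rfl, (Option.some_inj.mp h).symm⟩
    · have e1 : (c == '[') = false := beq_eq_false_iff_ne.mpr h1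
      have e2 : (c == '(') = false := beq_eq_false_iff_ne.mpr h2
      simp [altFlip, List.lookup, e1, e2] at h

theorem eye_not_nose {c : Char} (h : c ∈ altEyes) : c ∉ altNoses := by
  simp [altEyes] at h
  rcases h with rfl | rfl | rfl <;> decide

theorem nose_lookup {c : Char} (h : c ∈ altNoses) : altFlip.lookup c = none := by
  simp [altNoses] at h
  rcases h with rfl | rfl <;> decide

theorem altChar_none (l : List Char) (j : Nat)
    (h : altFlip.lookup (gch l j) = none) : altChar l j = gch l j := by
  unfold gch at h ⊢
  simp only [altChar, h]

theorem altChar_some (l : List Char) (j : Nat) (d : Char)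
    (h : altFlip.lookup (gch l j) = some d) :
    altChar l j =
      if (1 ≤ j ∧ gch l (j-1) ∈ altEyes) ∨
         (2 ≤ j ∧ gch l (j-1) ∈ altNoses ∧ gch l (j-2) ∈ altEyes)
      then d else gch l j := by
  unfold gch at h ⊢
  simp only [altChar, h]

theorem altChar_eye (l : List Char) (j : Nat) :
    (altChar l j ∈ altEyes) ↔ (gch l j ∈ altEyes) := by
  cases h : altFlip.lookup (gch l j) with
  | none => rw [altChar_none l j h]
  | some d =>
    rw [altChar_some l j d h]
    rcases lookup_flip h with ⟨hc, hd⟩ | ⟨hc, hd⟩ <;> rw [hc, hd] <;> split_ifs <;> decide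

theorem mval_le (l : List Char) (k j : Nat) (h : j ≤ k) : mval l k j = altChar l j := by
  unfold mval; rw [if_pos h]

theorem mval_gt (l : List Char) (k j : Nat) (h : k+1 < j) : mval l k j = gch l j := by
  unfold mval
  rw [if_neg (by omega), if_neg (by rintro ⟨h1, -⟩; omega)]

theorem mval_succ (l : List Char) (k : Nat) :
    mval l k (k+1) =
      if nCond l (k+1) then (altFlip.lookup (gch l (k+1))).getD ' ' else gch l (k+1) := by
  unfold mval
  rw [if_neg (by omega)]
  by_cases h : nCond l (k+1)
  · rw [if_pos ⟨rfl, h⟩, if_pos h]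
  · rw [if_neg (by rintro ⟨-, hn⟩; exact h hn), if_neg h]

-- if position k is not an eye, the (k+1)-st cell is already at its final value
theorem mval_succ_of_not_eye (l : List Char) (k : Nat) (heye : gch l k ∉ altEyes) :
    mval l k (k+1) = altChar l (k+1) := by
  rw [mval_succ]
  by_cases hn : nCond l (k+1)
  · rw [if_pos hn]
    obtain ⟨hs, h2, hno, hey⟩ := hn
    obtain ⟨d, hd⟩ := Option.isSome_iff_exists.mp hs
    rw [altChar_some l (k+1) d hd, hd, if_pos (Or.inr ⟨h2, hno, hey⟩)]
    rfl
  · rw [if_neg hn]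
    cases h : altFlip.lookup (gch l (k+1)) with
    | none => rw [altChar_none l (k+1) h]
    | some d =>
      rw [altChar_some l (k+1) d h, if_neg]
      rintro (⟨-, he⟩ | hr)
      · exact heye (by simpa using he)
      · exact hn ⟨by rw [h]; rfl, hr⟩

-- extensionality helper: a list agreeing with mval l (k+1) pointwise is mutL l (k+1)
theorem eq_mut_succ (l : List Char) (k : Nat) (xs : List Char)
    (hlen : xs.length = l.length)
    (h : ∀ j, j < l.length → xs.getD j ' ' = mval l (k+1) j) : xs = mutL l (k+1) := by
  apply List.ext_getElem (by rw [hlen, mutL_length])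
  intro j hj hj'
  have hx : xs[j] = xs.getD j ' ' := by
    simp [List.getD, List.getElem?_eq_getElem hj]
  have hm : (mutL l k.succ)[j] = mval l (k+1) j := by
    have := mutL_getElem? l (k+1) j
    rw [List.getElem?_eq_getElem hj'] at this
    rw [if_pos (by rw [mutL_length] at hj'; omega)] at this
    exact Option.some_inj.mp this
  rw [hx, hm, h j (by rw [mutL_length] at hj'; omega)]

theorem getD_set (xs : List Char) (m j : Nat) (v : Char) (hm : m < xs.length) :
    (xs.set m v).getD j ' ' = if m = j then (if j < xs.length then v else ' ') else xs.getD j ' ' := by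
  simp [List.getD, List.getElem?_set]
  split
  · split <;> simp_all
  · rfl

theorem mval_gt1_of (l : List Char) (k j : Nat) (hj : k+1 < j) (h : j = k+2 → ¬ nCond l j) :
    mval l (k+1) j = gch l j := by
  unfold mval
  rw [if_neg (by omega)]
  rcases Nat.lt_or_ge (k+2) j with hlt | hge
  · rw [if_neg (by rintro ⟨he, -⟩; omega)]
  · have hj2 : j = k+2 := by omega
    rw [if_neg (by rintro ⟨-, hn⟩; exact h hj2 hn)]

theorem not_nCond_of_lookup_prev {l : List Char} {k : Nat}
    (h2 : altFlip.lookup (gch l (k+1)) = some _d) : ¬ nCond l (k+2) := by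
  rintro ⟨-, -, hno, -⟩
  have : gch l (k+2-1) = gch l (k+1) := by norm_num
  rw [this] at hno
  rw [nose_lookup hno] at h2
  simp at h2

-- the heart of the equivalence: one iteration of A's loop advances the invariant
theorem step_mut (l : List Char) (k : Nat) (hk : k < l.length) (acc : List Char) :
    smileStep (mutL l k, acc) k = (mutL l (k+1), acc ++ [altChar l k]) := by
  have hA : (mutL l k).getD k ' ' = altChar l k := by
    rw [mutL_getD l k k hk, mval_le l k k (le_refl _)]
  by_cases heye : gch l k ∈ altEyes
  · have heye' : altChar l k ∈ pyEyes := (altChar_eye l k).mpr heye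
    have hnn : ¬ nCond l (k+1) := by
      rintro ⟨-, -, hno, -⟩
      exact eye_not_nose heye (by simpa using hno)
    by_cases h1 : k+1 < l.length
    · have e1 : (mutL l k)[k+1]? = some (gch l (k+1)) := by
        rw [mutL_getElem?, if_pos h1, mval_succ, if_neg hnn]
      cases h2 : altFlip.lookup (gch l (k+1)) with
      | some d =>
        have hd' : pySmiles.lookup (gch l (k+1)) = some d := h2
        have hdn : d ∉ pyNoses := by
          rcases lookup_flip h2 with ⟨-, rfl⟩ | ⟨-, rfl⟩ <;> decide
        have hset : ((mutL l k).set (k+1) d).getD (k+1) ' ' = d := by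
          rw [getD_set _ _ _ _ (by rw [mutL_length]; omega), if_pos rfl,
            if_pos (by rw [mutL_length]; omega)]
        simp only [smileStep, hA, if_pos heye', e1, hd', hset, if_neg hdn]
        refine Prod.ext ?_ rfl
        apply eq_mut_succ l k _ (by rw [List.length_set, mutL_length])
        intro j hj
        rw [getD_set _ _ _ _ (by rw [mutL_length]; omega)]
        by_cases hj1 : k+1 = j
        · subst hj1
          rw [if_pos rfl, if_pos (by rw [mutL_length]; omega), mval_le _ _ _ (le_refl _),
            altChar_some l (k+1) d h2, if_pos (Or.inl ⟨by omega, by simpa using heye⟩)]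
        · rw [if_neg hj1, mutL_getD _ _ _ hj]
          rcases Nat.lt_or_ge j (k+1) with hlt | hge
          · rw [mval_le _ _ _ (by omega), mval_le _ _ _ (by omega)]
          · have hgt : k+1 < j := by omega
            rw [mval_gt _ _ _ hgt, mval_gt1_of l k j hgt
              (fun hj2 => hj2 ▸ not_nCond_of_lookup_prev h2)]
      | none =>
        have hd' : pySmiles.lookup (gch l (k+1)) = none := h2
        have hc1 : (mutL l k).getD (k+1) ' ' = gch l (k+1) := by
          rw [mutL_getD _ _ _ h1, mval_succ, if_neg hnn]
        have haltk1 : altChar l (k+1) = gch l (k+1) := altChar_none l (k+1) h2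
        by_cases hnose : gch l (k+1) ∈ pyNoses
        · by_cases h3 : k+2 < l.length
          · have e2 : (mutL l k)[k+2]? = some (gch l (k+2)) := by
              rw [mutL_getElem?, if_pos h3, mval_gt _ _ _ (by omega)]
            cases h4 : altFlip.lookup (gch l (k+2)) with
            | some d2 =>
              have hd4 : pySmiles.lookup (gch l (k+2)) = some d2 := h4
              simp only [smileStep, hA, if_pos heye', e1, hd', hc1, if_pos hnose, e2, hd4]
              refine Prod.ext ?_ rfl
              apply eq_mut_succ l k _ (by rw [List.length_set, mutL_length])
              intro j hj
              rw [getD_set _ _ _ _ (by rw [mutL_length]; omega)]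
              by_cases hj2 : k+2 = j
              · subst hj2
                rw [if_pos rfl, if_pos (by rw [mutL_length]; omega)]
                have hcond : nCond l (k+2) :=
                  ⟨by rw [h4]; rfl, by omega, by simpa using hnose, by simpa using heye⟩
                unfold mval
                rw [if_neg (by omega), if_pos ⟨rfl, hcond⟩, h4]
                rfl
              · rw [if_neg hj2, mutL_getD _ _ _ hj]
                rcases Nat.lt_or_ge j (k+1) with hlt | hge
                · rw [mval_le _ _ _ (by omega), mval_le _ _ _ (by omega)]
                · by_cases hj1 : j = k+1
                  · subst hj1
                    rw [mval_succ, if_neg hnn, mval_le _ _ _ (le_refl _), haltk1]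
                  · have hgt2 : k+2 < j := by omega
                    rw [mval_gt _ _ _ (by omega), mval_gt1_of l k j (by omega)
                      (fun hj2 => absurd hj2 (by omega))]
            | none =>
              have hd4 : pySmiles.lookup (gch l (k+2)) = none := h4
              simp only [smileStep, hA, if_pos heye', e1, hd', hc1, if_pos hnose, e2, hd4]
              refine Prod.ext ?_ rfl
              apply eq_mut_succ l k _ (mutL_length l k)
              intro j hj
              rw [mutL_getD _ _ _ hj]
              rcases Nat.lt_or_ge j (k+1) with hlt | hge
              · rw [mval_le _ _ _ (by omega), mval_le _ _ _ (by omega)]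
              · by_cases hj1 : j = k+1
                · subst hj1
                  rw [mval_succ, if_neg hnn, mval_le _ _ _ (le_refl _), haltk1]
                · have hgt : k+1 < j := by omega
                  rw [mval_gt _ _ _ hgt, mval_gt1_of l k j hgt]
                  rintro hj2 ⟨hs, -, -, -⟩
                  subst hj2
                  rw [h4] at hs
                  simp at hs
          · have e2 : (mutL l k)[k+2]? = none := by
              rw [mutL_getElem?, if_neg h3]
            simp only [smileStep, hA, if_pos heye', e1, hd', hc1, if_pos hnose, e2]
            refine Prod.ext ?_ rfl
            apply eq_mut_succ l k _ (mutL_length l k)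
            intro j hj
            rw [mutL_getD _ _ _ hj]
            rcases Nat.lt_or_ge j (k+1) with hlt | hge
            · rw [mval_le _ _ _ (by omega), mval_le _ _ _ (by omega)]
            · have hj1 : j = k+1 := by omega
              subst hj1
              rw [mval_succ, if_neg hnn, mval_le _ _ _ (le_refl _), haltk1]
        · simp only [smileStep, hA, if_pos heye', e1, hd', hc1, if_neg hnose]
          refine Prod.ext ?_ rfl
          apply eq_mut_succ l k _ (mutL_length l k)
          intro j hj
          rw [mutL_getD _ _ _ hj]
          rcases Nat.lt_or_ge j (k+1) with hlt | hge
          · rw [mval_le _ _ _ (by omega), mval_le _ _ _ (by omega)]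
          · by_cases hj1 : j = k+1
            · subst hj1
              rw [mval_succ, if_neg hnn, mval_le _ _ _ (le_refl _), haltk1]
            · have hgt : k+1 < j := by omega
              rw [mval_gt _ _ _ hgt, mval_gt1_of l k j hgt]
              rintro hj2 ⟨-, -, hno, -⟩
              subst hj2
              have he : gch l (k+2-1) = gch l (k+1) := by norm_num
              rw [he] at hno
              exact hnose (by simpa using hno)
    · have e1 : (mutL l k)[k+1]? = none := by
        rw [mutL_getElem?, if_neg h1]
      simp only [smileStep, hA, if_pos heye', e1]
      refine Prod.ext ?_ rfl
      apply eq_mut_succ l k _ (mutL_length l k)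
      intro j hj
      rw [mutL_getD _ _ _ hj, mval_le _ _ _ (by omega), mval_le _ _ _ (by omega)]
  · have heye' : altChar l k ∉ pyEyes := fun hmem => heye ((altChar_eye l k).mp hmem)
    simp only [smileStep, hA, if_neg heye']
    refine Prod.ext ?_ rfl
    apply eq_mut_succ l k _ (mutL_length l k)
    intro j hj
    rw [mutL_getD _ _ _ hj]
    rcases Nat.lt_or_ge j (k+1) with hlt | hge
    · rw [mval_le _ _ _ (by omega), mval_le _ _ _ (by omega)]
    · by_cases hj1 : j = k+1
      · subst hj1
        rw [mval_succ_of_not_eye l k heye, mval_le _ _ _ (le_refl _)]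
      · have hgt : k+1 < j := by omega
        rw [mval_gt _ _ _ hgt, mval_gt1_of l k j hgt]
        rintro hj2 ⟨-, -, -, hey⟩
        subst hj2
        have he : gch l (k+2-2) = gch l k := by norm_num
        rw [he] at hey
        exact heye hey

theorem mutL_zero (l : List Char) : mutL l 0 = l := by
  apply List.ext_getElem (by simp [mutL_length])
  intro j hj hj'
  have h1 : (mutL l 0)[j] = mval l 0 j := by
    have := mutL_getElem? l 0 j
    rw [List.getElem?_eq_getElem hj] at this
    rw [if_pos (by simp [mutL_length] at hj; omega)] at this
    exact Option.some_inj.mp this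
  rw [h1]
  have hg : gch l j = l[j] := by simp [gch, List.getD, List.getElem?_eq_getElem hj']
  rcases Nat.eq_zero_or_pos j with rfl | hpos
  · rw [mval_le l 0 0 (by omega)]
    cases h : altFlip.lookup (gch l 0) with
    | none => rw [altChar_none l 0 h, hg]
    | some d =>
      rw [altChar_some l 0 d h, if_neg (by rintro (⟨h1, -⟩ | ⟨h2, -⟩) <;> omega), hg]
  · unfold mval
    rw [if_neg (by omega)]
    split
    · next hc => exact absurd hc.1 (by omega)
    · exact hg

theorem loop_inv (l : List Char) (k : Nat) (hk : k ≤ l.length) :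
    (List.range k).foldl smileStep (l, []) =
      (mutL l k, (List.range k).map (altChar l)) := by
  induction k with
  | zero => simp [mutL_zero]
  | succ m ih =>
    have hm : m ≤ l.length := by omega
    rw [List.range_succ, List.foldl_append, ih hm]
    simp only [List.foldl_cons, List.foldl_nil]
    rw [step_mut l m (by omega), List.map_append]
    simp

-- ===== VERDICT (by name: the statement is the Claim_ definition above) =====
theorem smile_spec : Claim_equal_smile := by
  intro text _
  unfold Spec_smile
  show String.ofList ((List.range text.toList.length).foldl smileStep (text.toList, [])).2 =
    String.ofList ((List.range text.toList.length).map (altChar text.toList))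
  rw [loop_inv text.toList text.toList.length (le_refl _)]
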